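-- pv_equiv track=rewrite | github.com/flakepowders/2022-Fall-CS2-Final-Mock-Exam-Solutions | A07_cheat.py | cheat
-- ===== SOURCE A (Python) =====
-- def cheat(K):
-- 	N=len(K)
-- 	maxc=max(K)
-- 	mode=[]
-- 	others=[]
-- 	intervals=[[] for _ in range(maxc-1)]
-- 	for i in range(N):
-- 		if K[i]==maxc: mode.append(i)
-- 		elif K[i]==maxc-1:
-- 			for j in intervals: j.append(i)
-- 		else: others = others + [i]*K[i]
-- 	for i in range(len(others)):
-- 		intervals[i%len(intervals)].append(others[i])
-- 	res = mode[:]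
--
-- 	for i in range(len(intervals)):
-- 		for j in intervals[i]: res.append(j)
-- 		for j in mode: res.append(j)
-- 	return res
-- ===== SOURCE B (Python) =====
-- def cheat(K):
--     maxc = max(K)
--     n = maxc - 1
--     mode = [i for i, k in enumerate(K) if k == maxc]
--     fulls = [i for i, k in enumerate(K) if k == maxc - 1]
--     others = [i for i, k in enumerate(K) if k < maxc - 1 for _ in range(k)]
--     res = list(mode)
--     for j in range(max(n, 0)):
--         res += fulls + others[j::n] + mode
--     return res
-- ===== Notes on version B (the rewrite author's own statement) =====
-- stated objective: faster
-- what changed: B never builds A's intervals/buckets: three comprehensions classify indices (mode, the maxc-1 indices kept once, an expanded others built without A's quadratic list re-concatenation), and each output block is read directly as the strided slice others[j::n], so the round-robin distribution structure disappears entirely.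
import Mathlib
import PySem

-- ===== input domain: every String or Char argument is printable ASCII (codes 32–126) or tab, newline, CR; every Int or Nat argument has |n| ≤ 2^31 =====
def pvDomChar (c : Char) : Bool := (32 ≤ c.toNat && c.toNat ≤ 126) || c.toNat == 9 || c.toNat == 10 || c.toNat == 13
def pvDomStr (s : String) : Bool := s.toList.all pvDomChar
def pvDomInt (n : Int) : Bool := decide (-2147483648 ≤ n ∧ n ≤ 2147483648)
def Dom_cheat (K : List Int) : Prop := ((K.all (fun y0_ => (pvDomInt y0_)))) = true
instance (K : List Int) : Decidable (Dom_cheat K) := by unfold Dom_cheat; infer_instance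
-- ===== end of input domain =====

-- B classifies by three comprehensions and assembles each block directly from the strided
-- slice others[j::n], replacing A's per-interval copying and round-robin bucket distribution
-- (objective: faster; A's 'others = others + [i]*K[i]' re-concatenation is quadratic).


-- ===== PORT A =====
def cheat (K : List Int) : List Int :=
  let N : Int := (K.length : Int)
  -- max(K): Python raises ValueError on K = [], which Pre_cheat excludes
  let maxc : Int := (PySem.List.max? K (fun x => x)).getD 0
  let st := (PySem.List.pyRange 0 N 1).foldl
    (fun (st : List Int × List Int × List (List Int)) i =>
      let k := PySem.List.pyGetD K i 0
      if k == maxc then (st.1 ++ [i], st.2.1, st.2.2)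
      else if k == maxc - 1 then (st.1, st.2.1, st.2.2.map (fun j => j ++ [i]))
      else (st.1, st.2.1 ++ PySem.List.pyRepeat [i] k, st.2.2))
    ([], [], (PySem.List.pyRange 0 (maxc - 1) 1).map (fun _ => ([] : List Int)))
  let mode := st.1
  let others := st.2.1
  -- intervals[i % len(intervals)].append(others[i]); len(intervals) = 0 here is Python's
  -- ZeroDivisionError, unreachable under Pre_cheat (others is empty then)
  let intervals := (PySem.List.pyRange 0 (others.length : Int) 1).foldl
    (fun (ivs : List (List Int)) i =>
      ivs.set (PySem.Int.mod i (ivs.length : Int)).toNat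
        (ivs.getD (PySem.Int.mod i (ivs.length : Int)).toNat [] ++ [PySem.List.pyGetD others i 0]))
    st.2.2
  (PySem.List.pyRange 0 (intervals.length : Int) 1).foldl
    (fun res i =>
      mode.foldl (fun r j => r ++ [j])
        ((PySem.List.pyGetD intervals i []).foldl (fun r j => r ++ [j]) res))
    mode

-- ===== PORT B =====
def cheat_alt (K : List Int) : List Int :=
  -- max(K): Python raises ValueError on K = [], which Pre_cheat excludes
  let maxc : Int := (PySem.List.max? K (fun x => x)).getD 0
  let n : Int := maxc - 1
  let mode := ((PySem.List.enumerate K 0).filter (fun p => p.2 == maxc)).map (fun p => p.1)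
  let fulls := ((PySem.List.enumerate K 0).filter (fun p => p.2 == maxc - 1)).map (fun p => p.1)
  let others := (PySem.List.enumerate K 0).flatMap
    (fun p => if p.2 < maxc - 1 then PySem.List.pyRepeat [p.1] p.2 else [])
  -- others[j::n]; the loop only runs with n ≥ 1, where slice? is always some (getD is exact)
  (PySem.List.pyRange 0 (max n 0) 1).foldl
    (fun res j => res ++ (fulls ++ (PySem.List.slice? others (some j) none n).getD [] ++ mode))
    mode

-- ===== PRECONDITION & SPEC =====
-- Pre_cheat excludes only the empty list, on which Python's max(K) raises ValueError.
def Pre_cheat (K : List Int) : Prop := K ≠ []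
instance (K : List Int) : Decidable (Pre_cheat K) := by unfold Pre_cheat; infer_instance
def pvWitness_cheat : List Int := [2, 1, 1, 0]
def Spec_cheat (K : List Int) (out : List Int) : Prop := out = cheat_alt K
instance (K : List Int) (out : List Int) : Decidable (Spec_cheat K out) := by unfold Spec_cheat; infer_instance

-- ===== CLAIM (what is proved, stated in full; the proofs are below) =====
def Claim_equal_cheat : Prop := ∀ (K : List Int), Dom_cheat K → Pre_cheat K → Spec_cheat K (cheat K)

-- ===== LEMMAS AND PROOFS =====

-- the three classification results, as functions of the enumerated input
def modeOf (maxc : Int) (l : List (Int × Int)) : List Int :=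
  (l.filter (fun p => p.2 == maxc)).map (fun p => p.1)
def fullsOf (maxc : Int) (l : List (Int × Int)) : List Int :=
  (l.filter (fun p => p.2 == maxc - 1)).map (fun p => p.1)
def othersOf (maxc : Int) (l : List (Int × Int)) : List Int :=
  l.flatMap (fun p => if p.2 == maxc then [] else if p.2 == maxc - 1 then []
             else PySem.List.pyRepeat [p.1] p.2)

-- elements of the list whose (start + position) ≡ j (mod n)
def pickFrom (n : Nat) : Nat → List Int → Nat → List Int
  | _, [], _ => []
  | s, x :: xs, j => (if s % n = j then [x] else []) ++ pickFrom n (s + 1) xs j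

-- every n-th element, starting with the head
def everyNth (n : Nat) : List Int → List Int
  | [] => []
  | x :: xs => x :: everyNth n (xs.drop (n - 1))
termination_by l => l.length
decreasing_by simp only [List.length_drop, List.length_cons]; omega

theorem everyNth_nil (n : Nat) : everyNth n [] = [] := by simp [everyNth]

theorem everyNth_cons (n : Nat) (x : Int) (xs : List Int) :
    everyNth n (x :: xs) = x :: everyNth n (xs.drop (n - 1)) := by rw [everyNth]

-- common normal form of both programs
def canon (K : List Int) : List Int :=
  let maxc : Int := (PySem.List.max? K (fun x => x)).getD 0
  let l := PySem.List.enumerate K 0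
  let n : Nat := (maxc - 1).toNat
  let M := modeOf maxc l
  let F := fullsOf maxc l
  let O := othersOf maxc l
  M ++ (List.range n).flatMap (fun j => F ++ pickFrom n 0 O j ++ M)

theorem loop1A (maxc : Int) (l : List (Int × Int)) :
    ∀ (m o : List Int) (iv : List (List Int)),
    l.foldl (fun (st : List Int × List Int × List (List Int)) p =>
        if p.2 == maxc then (st.1 ++ [p.1], st.2.1, st.2.2)
        else if p.2 == maxc - 1 then (st.1, st.2.1, st.2.2.map (fun j => j ++ [p.1]))
        else (st.1, st.2.1 ++ PySem.List.pyRepeat [p.1] p.2, st.2.2)) (m, o, iv)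
    = (m ++ modeOf maxc l, o ++ othersOf maxc l, iv.map (fun q => q ++ fullsOf maxc l)) := by
  induction l with
  | nil => intro m o iv; simp [modeOf, othersOf, fullsOf]
  | cons p l ih =>
    intro m o iv
    simp only [List.foldl_cons]
    by_cases h1 : p.2 = maxc
    · have e1 : (p.2 == maxc) = true := by simp [h1]
      have e2 : (p.2 == maxc - 1) = false := by simp; omega
      have hM : modeOf maxc (p :: l) = p.1 :: modeOf maxc l := by
        simp only [modeOf, List.filter_cons, e1, if_true, List.map_cons]
      have hF : fullsOf maxc (p :: l) = fullsOf maxc l := by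
        simp only [fullsOf, List.filter_cons, e2, Bool.false_eq_true, if_false]
      have hO : othersOf maxc (p :: l) = othersOf maxc l := by
        simp only [othersOf, List.flatMap_cons, e1, if_true, List.nil_append]
      simp only [e1, if_true, ih]
      rw [hM, hF, hO]
      simp [List.append_assoc]
    · by_cases h2 : p.2 = maxc - 1
      · have e1 : (p.2 == maxc) = false := by simp [h1]
        have e2 : (p.2 == maxc - 1) = true := by simp [h2]
        have hM : modeOf maxc (p :: l) = modeOf maxc l := by
          simp only [modeOf, List.filter_cons, e1, Bool.false_eq_true, if_false]
        have hF : fullsOf maxc (p :: l) = p.1 :: fullsOf maxc l := by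
          simp only [fullsOf, List.filter_cons, e2, if_true, List.map_cons]
        have hO : othersOf maxc (p :: l) = othersOf maxc l := by
          simp only [othersOf, List.flatMap_cons, e1, Bool.false_eq_true, if_false, e2,
                     if_true, List.nil_append]
        simp only [e1, e2, Bool.false_eq_true, if_false, if_true, ih]
        rw [hM, hF, hO]
        simp [List.map_map, Function.comp, List.append_assoc]
      · have e1 : (p.2 == maxc) = false := by simp [h1]
        have e2 : (p.2 == maxc - 1) = false := by simp [h2]
        have hM : modeOf maxc (p :: l) = modeOf maxc l := by
          simp only [modeOf, List.filter_cons, e1, Bool.false_eq_true, if_false]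
        have hF : fullsOf maxc (p :: l) = fullsOf maxc l := by
          simp only [fullsOf, List.filter_cons, e2, Bool.false_eq_true, if_false]
        have hO : othersOf maxc (p :: l) = PySem.List.pyRepeat [p.1] p.2 ++ othersOf maxc l := by
          simp only [othersOf, List.flatMap_cons, e1, Bool.false_eq_true, if_false, e2]
        simp only [e1, e2, Bool.false_eq_true, if_false, ih]
        rw [hM, hF, hO]
        simp [List.append_assoc]

theorem getD_map_const_lt {α : Type} (L : List α) (F : List Int) (j : Nat) (h : j < L.length) :
    (L.map (fun _ => F)).getD j [] = F := by
  rw [List.getD_eq_getElem?_getD, List.getElem?_map, List.getElem?_eq_getElem h]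
  simp

theorem getD_range_map {α : Type} (l : List α) (d : α) :
    (List.range l.length).map (fun j => l.getD j d) = l := by
  apply List.ext_getElem (by simp)
  intro i h1 h2
  simp [List.getD_eq_getElem?_getD, List.getElem?_eq_getElem h2]

theorem foldl_fix {α β : Type} (f : β → α → β) (b : β) (h : ∀ a, f b a = b) (l : List α) :
    l.foldl f b = b := by
  induction l with
  | nil => rfl
  | cons x l ih => simp [List.foldl_cons, h, ih]

-- the round-robin loop, A's body (modulus read from the accumulator's length)
theorem loop2A (n : Nat) (hn : 0 < n) (O : List Int) :
    ∀ (s : Nat) (ivs : List (List Int)), ivs.length = n →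
    (PySem.List.enumerate O (s : Int)).foldl
      (fun (bs : List (List Int)) p =>
        bs.set (PySem.Int.mod p.1 (bs.length : Int)).toNat
          (bs.getD (PySem.Int.mod p.1 (bs.length : Int)).toNat [] ++ [p.2])) ivs
    = (List.range n).map (fun j => ivs.getD j [] ++ pickFrom n s O j) := by
  induction O with
  | nil =>
    intro s ivs hl
    subst hl
    simp only [PySem.List.enumerate_nil, List.foldl_nil, pickFrom, List.append_nil]
    exact (getD_range_map ivs []).symm
  | cons x xs ih =>
    intro s ivs hl
    rw [PySem.List.enumerate_cons]
    simp only [List.foldl_cons]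
    have hm : (PySem.Int.mod (s : Int) ((ivs.length : Nat) : Int)).toNat = s % n := by
      rw [hl, PySem.Int.mod_natCast]; omega
    have hmlt : s % n < n := Nat.mod_lt _ hn
    have hlen : (ivs.set (s % n) (ivs.getD (s % n) [] ++ [x])).length = n := by simp [hl]
    have hcast : ((s : Int) + 1) = (((s + 1 : Nat)) : Int) := by push_cast; ring
    simp only [hm, hcast]
    rw [ih (s + 1) _ hlen]
    apply List.map_congr_left
    intro j hj
    rw [List.mem_range] at hj
    rw [show pickFrom n s (x :: xs) j = (if s % n = j then [x] else []) ++ pickFrom n (s + 1) xs j from rfl]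
    by_cases hjm : j = s % n
    · subst hjm
      have hlt : s % n < ivs.length := by omega
      have hset : (ivs.set (s % n) (ivs.getD (s % n) [] ++ [x])).getD (s % n) []
          = ivs.getD (s % n) [] ++ [x] := by
        rw [List.getD_eq_getElem?_getD, List.getElem?_set]
        simp [hlt, List.getD_eq_getElem?_getD]
      rw [hset]
      simp [List.append_assoc]
    · have hset : (ivs.set (s % n) (ivs.getD (s % n) [] ++ [x])).getD j [] = ivs.getD j [] := by
        rw [List.getD_eq_getElem?_getD, List.getElem?_set]
        rw [if_neg (fun h => hjm h.symm)]
        rw [List.getD_eq_getElem?_getD]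
      rw [hset, if_neg (fun h => hjm h.symm)]
      simp

-- pickFrom only depends on the start's residue
theorem pickFrom_mod (n : Nat) :
    ∀ (O : List Int) (s₁ s₂ j : Nat), s₁ % n = s₂ % n → pickFrom n s₁ O j = pickFrom n s₂ O j := by
  intro O
  induction O with
  | nil => intros; rfl
  | cons x xs ih =>
    intro s₁ s₂ j h
    rw [show pickFrom n s₁ (x :: xs) j
          = (if s₁ % n = j then [x] else []) ++ pickFrom n (s₁ + 1) xs j from rfl,
        show pickFrom n s₂ (x :: xs) j
          = (if s₂ % n = j then [x] else []) ++ pickFrom n (s₂ + 1) xs j from rfl, h,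
        ih (s₁ + 1) (s₂ + 1) j (by rw [Nat.add_mod s₁ 1, Nat.add_mod s₂ 1, h])]

-- pickFrom at residue j is the strided sublist starting at the first position ≡ j
theorem pickFrom_everyNth_gen (n : Nat) (hn : 0 < n) :
    ∀ (O : List Int) (s j g : Nat), s < n → j < n →
    ((s ≤ j ∧ g = j - s) ∨ (j < s ∧ g = j + n - s)) →
    pickFrom n s O j = everyNth n (O.drop g) := by
  intro O
  induction O with
  | nil => intro s j g _ _ _; simp [pickFrom, everyNth_nil]
  | cons x xs ih =>
    intro s j g hs hj hg
    rw [show pickFrom n s (x :: xs) j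
          = (if s % n = j then [x] else []) ++ pickFrom n (s + 1) xs j from rfl]
    have hsm : s % n = s := Nat.mod_eq_of_lt hs
    by_cases he : s = j
    · have hg0 : g = 0 := by omega
      subst hg0
      rw [hsm, if_pos he, List.drop_zero]
      have hrec : pickFrom n (s + 1) xs j = everyNth n (xs.drop (n - 1)) := by
        by_cases hlt : s + 1 < n
        · exact ih (s + 1) j (n - 1) hlt hj (Or.inr ⟨by omega, by omega⟩)
        · have hsn : s + 1 = n := by omega
          rw [pickFrom_mod n xs (s + 1) 0 j (by rw [hsn]; simp)]
          exact ih 0 j (n - 1) hn hj (Or.inl ⟨by omega, by omega⟩)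
      rw [hrec, everyNth_cons]
      rfl
    · have hg1 : 1 ≤ g := by omega
      rw [hsm, if_neg he, List.nil_append]
      have hdrop : (x :: xs).drop g = xs.drop (g - 1) := by
        cases g with
        | zero => omega
        | succ g' => simp
      rw [hdrop]
      by_cases hlt : s + 1 < n
      · refine ih (s + 1) j (g - 1) hlt hj ?_
        rcases hg with ⟨h1, h2⟩ | ⟨h1, h2⟩
        · exact Or.inl ⟨by omega, by omega⟩
        · exact Or.inr ⟨by omega, by omega⟩
      · have hsn : s + 1 = n := by omega
        have hjs : j < s := by omega
        rw [pickFrom_mod n xs (s + 1) 0 j (by rw [hsn]; simp)]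
        exact ih 0 j (g - 1) hn hj (Or.inl ⟨by omega, by omega⟩)

theorem pickFrom_everyNth (n : Nat) (hn : 0 < n) (O : List Int) (j : Nat) (hj : j < n) :
    pickFrom n 0 O j = everyNth n (O.drop j) :=
  pickFrom_everyNth_gen n hn O 0 j j hn hj (Or.inl ⟨Nat.zero_le _, rfl⟩)

-- the strided index list of slice?, in pure Nat form
theorem filterMap_stride (n : Nat) (hn : 0 < n) :
    ∀ (a j : Nat) (O : List Int), O.length - j ≤ a →
    (List.range ((O.length - j + n - 1) / n)).filterMap (fun k => O[j + n * k]?)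
      = everyNth n (O.drop j) := by
  intro a
  induction a with
  | zero =>
    intro j O h
    have hj : O.length ≤ j := by omega
    have h0 : O.length - j + n - 1 < n := by omega
    rw [Nat.div_eq_of_lt h0, List.range_zero, List.filterMap_nil,
        List.drop_eq_nil_of_le hj, everyNth_nil]
  | succ a ih =>
    intro j O h
    by_cases hj : O.length ≤ j
    · have h0 : O.length - j + n - 1 < n := by omega
      rw [Nat.div_eq_of_lt h0, List.range_zero, List.filterMap_nil,
          List.drop_eq_nil_of_le hj, everyNth_nil]
    · have hjl : j < O.length := by omega
      have hcount : (O.length - j + n - 1) / n = (O.length - (j + n) + n - 1) / n + 1 := by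
        by_cases hle : O.length ≤ j + n
        · have e1 : O.length - (j + n) + n - 1 < n := by omega
          have e2 : O.length - j + n - 1 = (O.length - j - 1) + n := by omega
          rw [Nat.div_eq_of_lt e1, e2, Nat.add_div_right _ hn,
              Nat.div_eq_of_lt (show O.length - j - 1 < n by omega)]
        · have e2 : O.length - j + n - 1 = (O.length - (j + n) + n - 1) + n := by omega
          rw [e2, Nat.add_div_right _ hn]
      rw [hcount, List.range_succ_eq_map, List.filterMap_cons]
      have h00 : O[j + n * 0]? = some (O[j]'hjl) := by
        rw [show (j + n * 0) = j by omega]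
        exact List.getElem?_eq_getElem hjl
      rw [h00]
      simp only [List.filterMap_map]
      have hfun : ((fun k => O[j + n * k]?) ∘ Nat.succ) = (fun k => O[(j + n) + n * k]?) := by
        funext k
        have : j + n * (k + 1) = (j + n) + n * k := by ring
        simp [Function.comp, Nat.succ_eq_add_one, this]
      rw [hfun, ih (j + n) O (by omega)]
      rw [List.drop_eq_getElem_cons hjl,
          everyNth_cons, List.drop_drop, show (j + 1 + (n - 1)) = j + n by omega]

-- others[j::n] for 0 ≤ j, 0 < n is the strided sublist
theorem slice?_stride (O : List Int) (j n : Nat) (hn : 0 < n) :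
    PySem.List.slice? O (some (j : Int)) none ((n : Int)) = some (everyNth n (O.drop j)) := by
  have hne : ((n : Int)) ≠ 0 := by omega
  have hnneg : ¬ ((n : Int) < 0) := by omega
  have hjneg : ¬ ((j : Int) < 0) := by omega
  rw [PySem.List.slice?]
  rw [if_neg hne]
  rw [PySem.List.sliceIndices]
  simp only [hnneg, if_false, hjneg]
  by_cases hjl : j < O.length
  · have hstart : min (j : Int) (O.length : Int) = (j : Int) := by omega
    rw [hstart, if_pos (by omega : (0:Int) < (n:Int)), if_pos (by omega : (j:Int) < (O.length:Int))]
    have hnum : ((O.length : Int) - (j : Int) + (n : Int) - 1)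
        = ((O.length - j + n - 1 : Nat) : Int) := by omega
    have hdiv : (((O.length - j + n - 1 : Nat) : Int) / ((n : Nat) : Int))
        = ((((O.length - j + n - 1) / n : Nat)) : Int) := by exact_mod_cast rfl
    rw [hnum, hdiv, Int.toNat_natCast]
    have hfun : (fun k : Nat => O[((j : Int) + (n : Int) * (k : Int)).toNat]?)
        = (fun k : Nat => O[j + n * k]?) := by
      funext k
      have : ((j : Int) + (n : Int) * (k : Int)).toNat = j + n * k := by
        omega
      rw [this]
    rw [hfun, filterMap_stride n hn (O.length - j) j O (le_refl _)]
  · have hstart : min (j : Int) (O.length : Int) = (O.length : Int) := by omega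
    rw [hstart, if_pos (by omega : (0:Int) < (n:Int)),
        if_neg (by omega : ¬ ((O.length : Int) < (O.length : Int)))]
    rw [List.drop_eq_nil_of_le (by omega : O.length ≤ j), everyNth_nil]
    rfl

theorem cheat_eq_canon (K : List Int) : cheat K = canon K := by
  simp only [cheat, canon]
  set maxc : Int := (PySem.List.max? K (fun x => x)).getD 0 with hmaxc
  have hfold : ∀ init : List Int × List Int × List (List Int),
      (PySem.List.pyRange 0 ((K.length : Int)) 1).foldl
        (fun (st : List Int × List Int × List (List Int)) i =>
          if PySem.List.pyGetD K i 0 == maxc then (st.1 ++ [i], st.2.1, st.2.2)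
          else if PySem.List.pyGetD K i 0 == maxc - 1 then
            (st.1, st.2.1, st.2.2.map (fun j => j ++ [i]))
          else (st.1, st.2.1 ++ PySem.List.pyRepeat [i] (PySem.List.pyGetD K i 0), st.2.2)) init
      = (PySem.List.enumerate K 0).foldl
        (fun (st : List Int × List Int × List (List Int)) p =>
          if p.2 == maxc then (st.1 ++ [p.1], st.2.1, st.2.2)
          else if p.2 == maxc - 1 then (st.1, st.2.1, st.2.2.map (fun j => j ++ [p.1]))
          else (st.1, st.2.1 ++ PySem.List.pyRepeat [p.1] p.2, st.2.2)) init := by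
    intro init
    rw [PySem.List.enumerate_eq_map_pyRange K 0, PySem.List.len_eq, List.foldl_map]
  rw [hfold]
  rw [loop1A maxc (PySem.List.enumerate K 0) [] []
      ((PySem.List.pyRange 0 (maxc - 1) 1).map (fun _ => ([] : List Int)))]
  dsimp only
  simp only [List.nil_append, List.map_map]
  set l := PySem.List.enumerate K 0 with hl
  set M := modeOf maxc l with hM
  set F := fullsOf maxc l with hF
  set O := othersOf maxc l with hO
  have hcomp : ((fun q => q ++ F) ∘ (fun _ : Int => ([] : List Int))) = (fun _ : Int => F) := by
    funext q; simp
  rw [hcomp]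
  have hfold2 : ∀ ivs0 : List (List Int),
      (PySem.List.pyRange 0 ((O.length : Int)) 1).foldl
        (fun (ivs : List (List Int)) i =>
          ivs.set (PySem.Int.mod i (ivs.length : Int)).toNat
            (ivs.getD (PySem.Int.mod i (ivs.length : Int)).toNat []
              ++ [PySem.List.pyGetD O i 0])) ivs0
      = (PySem.List.enumerate O 0).foldl
        (fun (bs : List (List Int)) p =>
          bs.set (PySem.Int.mod p.1 (bs.length : Int)).toNat
            (bs.getD (PySem.Int.mod p.1 (bs.length : Int)).toNat [] ++ [p.2])) ivs0 := by
    intro ivs0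
    rw [PySem.List.enumerate_eq_map_pyRange O 0, PySem.List.len_eq, List.foldl_map]
  rw [hfold2]
  set n := (maxc - 1).toNat with hn
  rcases Nat.eq_zero_or_pos n with h0 | hpos
  · have hr : PySem.List.pyRange 0 (maxc - 1) 1 = [] :=
      PySem.List.pyRange_one_eq_nil (by omega)
    rw [hr]
    simp only [List.map_nil]
    have hb : (PySem.List.enumerate O 0).foldl
        (fun (bs : List (List Int)) p =>
          bs.set (PySem.Int.mod p.1 (bs.length : Int)).toNat
            (bs.getD (PySem.Int.mod p.1 (bs.length : Int)).toNat [] ++ [p.2]))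
        ([] : List (List Int)) = [] :=
      foldl_fix _ _ (fun p => rfl) _
    rw [hb]
    rw [show PySem.List.pyRange 0 ((([] : List (List Int)).length : Int)) 1 = [] from
        PySem.List.pyRange_one_eq_nil (by simp)]
    simp [h0]
  · have hlen1 : ((PySem.List.pyRange 0 (maxc - 1) 1).map (fun _ : Int => F)).length = n := by
      rw [List.length_map, PySem.List.length_pyRange_one]; omega
    have h2 := loop2A n hpos O 0
      ((PySem.List.pyRange 0 (maxc - 1) 1).map (fun _ : Int => F)) hlen1
    simp only [Nat.cast_zero] at h2
    rw [h2]
    rw [show (List.range n).map (fun j =>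
          ((PySem.List.pyRange 0 (maxc - 1) 1).map (fun _ : Int => F)).getD j []
            ++ pickFrom n 0 O j)
        = (List.range n).map (fun j => F ++ pickFrom n 0 O j) from
      List.map_congr_left (fun j hj => by
        rw [getD_map_const_lt _ _ _ (by
          rw [PySem.List.length_pyRange_one]; rw [List.mem_range] at hj; omega)])]
    set IV := (List.range n).map (fun j => F ++ pickFrom n 0 O j) with hIV
    have hasm : (PySem.List.pyRange 0 ((IV.length : Int)) 1).foldl
        (fun res i =>
          M.foldl (fun r j => r ++ [j])
            ((PySem.List.pyGetD IV i []).foldl (fun r j => r ++ [j]) res)) M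
        = IV.foldl (fun res iv =>
            M.foldl (fun r j => r ++ [j]) (iv.foldl (fun r j => r ++ [j]) res)) M :=
      PySem.List.foldl_pyRange_zero_pyGetD' IV []
        (fun res iv => M.foldl (fun r j => r ++ [j]) (iv.foldl (fun r j => r ++ [j]) res)) M
    rw [hasm]
    simp only [PySem.List.foldl_append_singleton_eq_self]
    have hbody : (fun (res iv : List Int) => res ++ iv ++ M)
        = (fun res iv => res ++ (iv ++ M)) := by
      funext a b; rw [List.append_assoc]
    rw [hbody, PySem.List.foldl_append_eq_flatMap]
    rw [hIV, List.flatMap_map]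

theorem cheat_alt_eq_canon (K : List Int) (hK : K ≠ []) : cheat_alt K = canon K := by
  simp only [cheat_alt, canon]
  set maxc : Int := (PySem.List.max? K (fun x => x)).getD 0 with hmaxc
  set l := PySem.List.enumerate K 0 with hl
  -- every value in K is ≤ maxc (K is nonempty, so max? is some)
  have hmax : ∀ p ∈ l, p.2 ≤ maxc := by
    intro p hp
    rcases (PySem.List.mem_enumerate_iff K 0 p).mp hp with ⟨k, hk, hpk⟩
    have hmem : p.2 ∈ K := by rw [hpk]; exact List.getElem_mem hk
    cases hmq : PySem.List.max? K (fun x => x) with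
    | none => exact absurd ((PySem.List.max?_eq_none_iff K _).mp hmq) hK
    | some m =>
      have := PySem.List.max?_isMax hmq p.2 hmem
      simp only [hmaxc, hmq, Option.getD_some]
      exact this
  -- B's others equals A's othersOf (values above maxc cannot occur)
  have hothers : l.flatMap (fun p => if p.2 < maxc - 1 then PySem.List.pyRepeat [p.1] p.2 else [])
      = othersOf maxc l := by
    rw [othersOf]
    refine List.flatMap_congr ?_
    intro p hp
    have hle := hmax p hp
    by_cases h1 : p.2 = maxc
    · simp only [h1]
      rw [if_neg (by omega), if_pos (by simp)]
    · by_cases h2 : p.2 = maxc - 1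
      · simp only [h2]
        rw [if_neg (by omega), if_neg (by simp only [beq_iff_eq]; omega), if_pos (by simp)]
      · have hlt : p.2 < maxc - 1 := by omega
        rw [if_pos hlt, if_neg (by simp [h1]), if_neg (by simp [h2])]
  rw [hothers]
  have hMdef : List.map (fun p => p.1) (List.filter (fun p => p.2 == maxc) l)
      = modeOf maxc l := rfl
  have hFdef : List.map (fun p => p.1) (List.filter (fun p => p.2 == maxc - 1) l)
      = fullsOf maxc l := rfl
  rw [hMdef, hFdef]
  set M := modeOf maxc l with hM
  set F := fullsOf maxc l with hF
  set O := othersOf maxc l with hO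
  set n := (maxc - 1).toNat with hn
  rcases Nat.eq_zero_or_pos n with h0 | hpos
  · have hr : PySem.List.pyRange 0 (max (maxc - 1) 0) 1 = [] :=
      PySem.List.pyRange_one_eq_nil (by omega)
    rw [hr]
    simp [h0, modeOf, hM]
  · have hmx : max (maxc - 1) 0 = ((n : Nat) : Int) := by omega
    rw [hmx, PySem.List.pyRange_one 0 ((n : Nat) : Int)]
    rw [show (((n : Nat) : Int) - 0).toNat = n by omega]
    rw [List.foldl_map]
    have hcongr : ∀ (res : List Int) (k : Nat), k ∈ List.range n →
        res ++ (F ++ (PySem.List.slice? O (some ((0 : Int) + (k : Int))) none (maxc - 1)).getD [] ++ M)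
        = res ++ (F ++ pickFrom n 0 O k ++ M) := by
      intro res k hk
      rw [List.mem_range] at hk
      rw [show ((0 : Int) + (k : Int)) = (k : Int) by ring,
          show (maxc - 1) = ((n : Nat) : Int) by omega,
          slice?_stride O k n hpos, Option.getD_some,
          pickFrom_everyNth n hpos O k hk]
    rw [PySem.List.foldl_congr_mem' (List.range n)
        (fun res k => res ++ (F ++ (PySem.List.slice? O (some ((0 : Int) + (k : Int))) none (maxc - 1)).getD [] ++ M))
        (fun res k => res ++ (F ++ pickFrom n 0 O k ++ M)) M
        (fun k hk res => hcongr res k hk)]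
    rw [PySem.List.foldl_append_eq_flatMap (fun k => F ++ pickFrom n 0 O k ++ M) (List.range n) M]

-- ===== VERDICT (by name: the statement is the Claim_ definition above) =====
theorem cheat_spec : Claim_equal_cheat := by
  intro K _ hpre
  unfold Spec_cheat
  rw [cheat_eq_canon, cheat_alt_eq_canon K hpre]
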